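-- pv_equiv track=rewrite | github.com/pypi-data/pypi-mirror-335 | packages/llmdirtree/llmdirtree-0.1.2-py3-none-any.whl/dirtree/main.py | convert_gitignore_pattern_to_regex
-- ===== SOURCE A (Python) =====
-- def convert_gitignore_pattern_to_regex(pattern: str) -> str:
--     """
--     Convert a gitignore pattern to a regex pattern.
--
--     Handles special gitignore pattern features:
--     * - matches any string except path separator
--     ** - matches any string including path separator
--     ? - matches a single character except path separator
--     [abc] - matches characters in brackets
--     ! - negates a pattern
--     """
--     if not pattern:
--         return ""
--
--     # Handle directory-only pattern (trailing slash)
--     dir_only = False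
--     if pattern.endswith("/"):
--         dir_only = True
--         pattern = pattern[:-1]
--
--     # Escape special regex characters but keep gitignore wildcards
--     escaped = ""
--     i = 0
--     while i < len(pattern):
--         # Handle ** wildcard (matches across directories)
--         if i + 1 < len(pattern) and pattern[i : i + 2] == "**":
--             escaped += ".*"
--             i += 2
--         # Handle * wildcard (doesn't match directory separator)
--         elif pattern[i] == "*":
--             escaped += "[^/]*"
--             i += 1
--         # Handle ? wildcard (single character, but not directory separator)
--         elif pattern[i] == "?":
--             escaped += "[^/]"
--             i += 1
--         # Handle character classes [abc]
--         elif pattern[i] == "[":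
--             end_bracket = pattern.find("]", i)
--             if end_bracket != -1:
--                 escaped += pattern[i : end_bracket + 1]
--                 i = end_bracket + 1
--             else:
--                 escaped += "\\["
--                 i += 1
--         # Escape regex special characters
--         elif pattern[i] in ".+(){}^$|\\":
--             escaped += "\\" + pattern[i]
--             i += 1
--         else:
--             escaped += pattern[i]
--             i += 1
--
--     # If it's a directory pattern, it should match the directory and all its contents
--     if dir_only:
--         return f"^{escaped}(/.*)?$"
--     else:
--         return f"^{escaped}$"
-- ===== SOURCE B (Python) =====
-- import re
--
-- _TOKEN = re.compile(r'\*\*|\*|\?|\[[^\]]*\]|.', re.DOTALL)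
-- _ESCAPE = set(".+(){}^$|\\")
--
-- def _replace(m):
--     tok = m.group(0)
--     if tok == "**":
--         return ".*"
--     if tok == "*":
--         return "[^/]*"
--     if tok == "?":
--         return "[^/]"
--     if len(tok) > 1:  # a full [...] character class, kept verbatim
--         return tok
--     if tok == "[":    # unclosed bracket
--         return "\\["
--     if tok in _ESCAPE:
--         return "\\" + tok
--     return tok
--
-- def convert_gitignore_pattern_to_regex(pattern: str) -> str:
--     if not pattern:
--         return ""
--     dir_only = pattern.endswith("/")
--     if dir_only:
--         pattern = pattern[:-1]
--     body = _TOKEN.sub(_replace, pattern)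
--     return f"^{body}(/.*)?$" if dir_only else f"^{body}$"
-- ===== Notes on version B (the rewrite author's own statement) =====
-- stated objective: idiomatic
-- what changed: Replaced A's manual index-arithmetic while loop (pattern.find from i and slice bookkeeping) by a single re.sub over the tokenizing alternation r'\*\*|\*|\?|\[[^\]]*\]|.' with a replacement function; the regex engine does the scanning.
import Mathlib
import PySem

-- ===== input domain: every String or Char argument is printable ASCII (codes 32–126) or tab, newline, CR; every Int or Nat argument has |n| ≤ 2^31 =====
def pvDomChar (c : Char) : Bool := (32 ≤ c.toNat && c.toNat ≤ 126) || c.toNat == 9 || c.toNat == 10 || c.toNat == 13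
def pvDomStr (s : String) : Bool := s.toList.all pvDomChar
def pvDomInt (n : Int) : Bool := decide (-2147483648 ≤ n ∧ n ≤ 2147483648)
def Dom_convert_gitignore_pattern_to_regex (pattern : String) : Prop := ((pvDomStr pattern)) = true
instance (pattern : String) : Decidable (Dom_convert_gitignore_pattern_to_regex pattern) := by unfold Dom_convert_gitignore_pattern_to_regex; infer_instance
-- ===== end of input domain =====

-- B replaces A's index-arithmetic while loop (find("]") and manual slicing) by a regex-driven
-- tokenizer (re.sub with a replacement function); same return value, objective: idiomatic.

-- ===== PORT A =====
-- A's while loop over index i, transcribed as recursion on the remaining suffix of the pattern: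
-- pattern[i:i+2] == "**" is slice s [0:2]; pattern.find("]", i) is find on the suffix; branch order kept.
def loopA : List Char → List Char
  | [] => []
  | c :: rest =>
    if rest ≠ [] ∧ PySem.Chars.slice (c :: rest) (some 0) (some 2) = ['*', '*'] then
      ".*".toList ++ loopA (rest.drop 1)
    else if c = '*' then
      "[^/]*".toList ++ loopA rest
    else if c = '?' then
      "[^/]".toList ++ loopA rest
    else if c = '[' then
      let eb := PySem.Chars.find (c :: rest) [']']
      if eb ≠ -1 then
        PySem.Chars.slice (c :: rest) (some 0) (some (eb + 1)) ++ loopA ((c :: rest).drop (eb + 1).toNat)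
      else
        "\\[".toList ++ loopA rest
    else if (".+(){}^$|\\".toList.contains c) then
      '\\' :: c :: loopA rest
    else
      c :: loopA rest
termination_by s => s.length
decreasing_by
  all_goals simp only [List.length_drop, List.length_cons]
  all_goals first
    | omega
    | (rename_i heb
       have heb' : PySem.Chars.find (c :: rest) [']'] ≠ -1 := heb
       have h0 := PySem.Chars.neg_one_le_find (c :: rest) [']']
       omega)

def convert_gitignore_pattern_to_regex (pattern : String) : String :=
  let cs := pattern.toList
  if cs.length = 0 then ""
  else
    let dir_only := PySem.Chars.endswith cs ['/']
    let cs' := if dir_only then PySem.Chars.slice cs none (some (-1)) else cs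
    let escaped := loopA cs'
    if dir_only then String.ofList (('^' :: escaped) ++ "(/.*)?$".toList)
    else String.ofList (('^' :: escaped) ++ ['$'])

-- ===== PORT B =====
-- B tokenizes with re.sub over r'\*\*|\*|\?|\[[^\]]*\]|.': nextToken is that alternation
-- (leftmost match, alternatives tried in order), replaceTok is Source B's _replace.
def nextToken : List Char → List Char × List Char
  | [] => ([], [])
  | c :: rest =>
    if c = '*' then
      if rest.head? = some '*' then (['*', '*'], rest.tail) else (['*'], rest)
    else if c = '[' then
      let cls := rest.takeWhile (· ≠ ']')
      if cls.length < rest.length then ('[' :: cls ++ [']'], rest.drop (cls.length + 1))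
      else (['['], rest)
    else ([c], rest)

theorem nextToken_snd_lt (c : Char) (rest : List Char) :
    (nextToken (c :: rest)).2.length < (c :: rest).length := by
  simp only [nextToken]
  split_ifs <;> simp

def replaceTok (tok : List Char) : List Char :=
  if tok = ['*', '*'] then ".*".toList
  else if tok = ['*'] then "[^/]*".toList
  else if tok = ['?'] then "[^/]".toList
  else if 1 < tok.length then tok
  else if tok = ['['] then "\\[".toList
  else
    match tok with
    | [c] => if (".+(){}^$|\\".toList.contains c) then ['\\', c] else [c]
    | _ => tok

def tokB : List Char → List Char
  | [] => []
  | c :: rest =>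
    replaceTok (nextToken (c :: rest)).1 ++ tokB (nextToken (c :: rest)).2
termination_by s => s.length
decreasing_by exact nextToken_snd_lt c rest

def convert_gitignore_pattern_to_regex_alt (pattern : String) : String :=
  match pattern.toList with
  | [] => ""
  | cs =>
    let dir_only := PySem.Chars.endswith cs ['/']
    let body := tokB (if dir_only then cs.dropLast else cs)
    String.ofList (('^' :: body) ++ (if dir_only then "(/.*)?$".toList else ['$']))

-- ===== PRECONDITION & SPEC =====
def Spec_convert_gitignore_pattern_to_regex (pattern : String) (out : String) : Prop := out = convert_gitignore_pattern_to_regex_alt pattern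
instance (pattern : String) (out : String) : Decidable (Spec_convert_gitignore_pattern_to_regex pattern out) := by unfold Spec_convert_gitignore_pattern_to_regex; infer_instance

-- ===== CLAIM (what is proved, stated in full; the proofs are below) =====
def Claim_equal_convert_gitignore_pattern_to_regex : Prop := ∀ (pattern : String), Dom_convert_gitignore_pattern_to_regex pattern → Spec_convert_gitignore_pattern_to_regex pattern (convert_gitignore_pattern_to_regex pattern)

-- ===== LEMMAS AND PROOFS =====

theorem singleton_prefix_iff (a : Char) (l : List Char) : [a] <+: l ↔ l.head? = some a := by
  cases l <;> simp [List.cons_prefix_cons, eq_comm]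

-- A's pattern[i:i+2] on the suffix is take 2
theorem slice02 (xs : List Char) :
    PySem.List.slice xs none (some 2) = xs.take 2 := by
  simp [pysem]

theorem slice02' (c : Char) (rest : List Char) :
    PySem.Chars.slice (c :: rest) (some 0) (some 2) = (c :: rest).take 2 := by
  simp [pysem]

-- Chars.find of a single character at a split point
theorem find_split (t u : List Char) (a : Char) (ht : a ∉ t) :
    PySem.Chars.find (t ++ a :: u) [a] = (t.length : Int) := by
  have hinf : [a] <:+: (t ++ a :: u) := (List.singleton_infix_iff a _).2 (by simp)
  have h0 : 0 ≤ PySem.Chars.find (t ++ a :: u) [a] := (PySem.Chars.find_nonneg_iff _ _).2 hinf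
  obtain ⟨hpre, hmin⟩ := PySem.Chars.find_spec h0
  set k := (PySem.Chars.find (t ++ a :: u) [a]).toNat with hk
  have hle : k ≤ t.length := by
    by_contra hgt
    exact hmin t.length (by omega) ((singleton_prefix_iff a _).2 (by simp))
  have hne : ¬ k < t.length := by
    intro hlt
    have h1 := (singleton_prefix_iff a _).1 hpre
    rw [List.head?_drop] at h1
    rw [List.getElem?_append_left hlt] at h1
    exact ht (List.mem_of_getElem? h1)
  omega

theorem find_none (s : List Char) (a : Char) (h : a ∉ s) :
    PySem.Chars.find s [a] = -1 :=
  (PySem.Chars.find_eq_neg_one_iff _ _).2 (fun hin => h ((List.singleton_infix_iff a s).1 hin))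

-- splitting a list at the first occurrence of a character
theorem split_first (a : Char) (l : List Char) (h : a ∈ l) :
    l = l.takeWhile (· ≠ a) ++ a :: l.drop ((l.takeWhile (· ≠ a)).length + 1) := by
  induction l with
  | nil => cases h
  | cons x xs ih =>
    by_cases hx : x = a
    · subst hx; simp
    · have hmem : a ∈ xs := by
        cases List.mem_cons.1 h with
        | inl h' => exact absurd h'.symm hx
        | inr h' => exact h'
      have htw : (x :: xs).takeWhile (· ≠ a) = x :: xs.takeWhile (· ≠ a) := by
        simp [hx]
      rw [htw]
      simp only [List.length_cons, List.cons_append, List.drop_succ_cons]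
      exact congrArg (x :: ·) (ih hmem)

-- the core equivalence: A's scanner emits exactly B's token-by-token substitution
theorem loopA_eq_tokB (s : List Char) : loopA s = tokB s := by
  induction s using loopA.induct with
  | case1 => simp [loopA, tokB]
  | case2 c rest h ih =>
    obtain ⟨hne, hsl⟩ := h
    rw [slice02'] at hsl
    cases rest with
    | nil => simp at hne
    | cons d r =>
      simp at hsl
      obtain ⟨hc, hd⟩ := hsl
      subst hc; subst hd
      simp only [List.drop_succ_cons, List.drop_zero] at ih
      rw [loopA, tokB]
      simp [slice02, nextToken, replaceTok, ih]
  | case3 rest h ih =>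
    have hh : rest.head? ≠ some '*' := by
      intro hh
      cases rest with
      | nil => simp at hh
      | cons d r =>
        simp at hh; subst hh
        exact h ⟨by simp, by rw [slice02']; simp⟩
    rw [loopA, tokB]
    rw [if_neg h, if_pos rfl]
    simp only [nextToken, if_neg hh]
    simp [replaceTok, ih]
  | case4 rest h h1 ih =>
    rw [loopA, tokB]
    rw [if_neg h, if_neg h1, if_pos rfl]
    simp only [nextToken, if_neg (by decide : ¬('?' : Char) = '*'),
      if_neg (by decide : ¬('?' : Char) = '[')]
    simp [replaceTok, ih]
  | case5 rest h h1 h2 eb heb ih =>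
    have heb' : PySem.Chars.find ('[' :: rest) [']'] ≠ -1 := heb
    have hmem : ']' ∈ rest := by
      by_contra hnm
      exact heb' (find_none _ _ (by simp [hnm]))
    set t := rest.takeWhile (· ≠ ']') with hT
    set u := rest.drop (t.length + 1) with hU
    have hru : rest = t ++ ']' :: u := split_first ']' rest hmem
    have hbr : ']' ∉ ('[' :: t) := by
      rw [hT]
      simp only [List.mem_cons, not_or]
      exact ⟨by decide, fun hin => by have := List.mem_takeWhile_imp hin; simp at this⟩
    have hfind : PySem.Chars.find ('[' :: rest) [']'] = ((t.length + 1 : Nat) : Int) := by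
      rw [hru, show ('[' :: (t ++ ']' :: u)) = ('[' :: t) ++ ']' :: u by simp,
        find_split ('[' :: t) u ']' hbr]
      simp
    have hlt : t.length < rest.length := by rw [hru]; simp
    have hsl : PySem.Chars.slice ('[' :: rest) (some 0) (some (PySem.Chars.find ('[' :: rest) [']'] + 1))
        = '[' :: t ++ [']'] := by
      rw [hfind, PySem.Chars.slice_eq_listSlice, PySem.List.slice_zero_start,
        show ((((t.length + 1 : Nat) : Int)) + 1) = ((t.length + 2 : Nat) : Int) by push_cast; ring,
        PySem.List.slice_to_natCast]
      rw [hru, show t.length + 2 = (t.length + 1) + 1 by omega]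
      simp [List.take_append]
    have hdrop : ('[' :: rest).drop (PySem.Chars.find ('[' :: rest) [']'] + 1).toNat = u := by
      rw [hfind, show ((((t.length + 1 : Nat) : Int)) + 1).toNat = t.length + 2 by omega]
      rw [hru, show ('[' :: (t ++ ']' :: u)) = ('[' :: t) ++ ']' :: u by simp,
        show t.length + 2 = ('[' :: t).length + 1 by simp]
      rw [List.drop_append]
      simp
    have hrep : replaceTok ('[' :: t ++ [']']) = '[' :: t ++ [']'] := by
      simp [replaceTok]
    have ihu : loopA u = tokB u := by
      have hd : ('[' :: rest).drop (eb + 1).toNat = u := hdrop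
      rw [hd] at ih
      exact ih
    rw [loopA, tokB]
    rw [if_neg h, if_neg (by decide : ¬('[' : Char) = '*'),
      if_neg (by decide : ¬('[' : Char) = '?'), if_pos rfl]
    simp only [ne_eq, heb', not_false_eq_true, reduceIte]
    rw [hsl, hdrop, ihu]
    simp only [nextToken, if_neg (by decide : ¬('[' : Char) = '*'), ← hT, ← hU,
      hlt, reduceIte]
    rw [hrep]
  | case6 rest h h1 h2 eb hne ih =>
    have hne' : PySem.Chars.find ('[' :: rest) [']'] = -1 := by
      have h3 : ¬ PySem.Chars.find ('[' :: rest) [']'] ≠ -1 := hne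
      omega
    have hnm : ']' ∉ rest := by
      intro hm
      set t := rest.takeWhile (· ≠ ']') with hT
      have hru : rest = t ++ ']' :: rest.drop (t.length + 1) := split_first ']' rest hm
      have hbr : ']' ∉ ('[' :: t) := by
        rw [hT]
        simp only [List.mem_cons, not_or]
        exact ⟨by decide, fun hin => by have := List.mem_takeWhile_imp hin; simp at this⟩
      have hf : PySem.Chars.find ('[' :: rest) [']'] = ((('[' :: t).length : Nat) : Int) := by
        rw [hru, show ('[' :: (t ++ ']' :: rest.drop (t.length + 1)))
            = ('[' :: t) ++ ']' :: rest.drop (t.length + 1) by simp]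
        exact find_split ('[' :: t) _ ']' hbr
      rw [hne'] at hf
      simp at hf
      omega
    have htk : rest.takeWhile (· ≠ ']') = rest :=
      List.takeWhile_eq_self_iff.2 (fun y hy => by simp; exact fun h' => hnm (h' ▸ hy))
    rw [loopA, tokB]
    rw [if_neg h, if_neg (by decide : ¬('[' : Char) = '*'),
      if_neg (by decide : ¬('[' : Char) = '?'), if_pos rfl]
    simp only [ne_eq, hne', not_true_eq_false, reduceIte]
    simp only [nextToken, if_neg (by decide : ¬('[' : Char) = '*'), htk,
      if_neg (lt_irrefl rest.length)]
    simp [replaceTok, ih]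
  | case7 c rest h h1 h2 h3 hcont ih =>
    rw [loopA, tokB]
    rw [if_neg h, if_neg h1, if_neg h2, if_neg h3, if_pos hcont]
    simp only [nextToken, if_neg h1, if_neg h3]
    simp at hcont
    simp [replaceTok, h1, h2, h3, hcont, ih]
  | case8 c rest h h1 h2 h3 hcont ih =>
    rw [loopA, tokB]
    rw [if_neg h, if_neg h1, if_neg h2, if_neg h3, if_neg hcont]
    simp only [nextToken, if_neg h1, if_neg h3]
    simp at hcont
    simp [replaceTok, h1, h2, h3, hcont, ih]

-- ===== VERDICT (by name: the statement is the Claim_ definition above) =====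
theorem convert_gitignore_pattern_to_regex_spec : Claim_equal_convert_gitignore_pattern_to_regex := by
  intro pattern _
  unfold Spec_convert_gitignore_pattern_to_regex
  unfold convert_gitignore_pattern_to_regex convert_gitignore_pattern_to_regex_alt
  cases hcs : pattern.toList with
  | nil => simp
  | cons c rest =>
    rw [if_neg (by simp)]
    by_cases hdir : PySem.Chars.endswith (c :: rest) ['/']
    · simp only [hdir, reduceIte]
      rw [PySem.Chars.slice_eq_listSlice, PySem.List.slice_to_neg_one, loopA_eq_tokB]
    · simp only [hdir]
      rw [loopA_eq_tokB]
      simp
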